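-- pv_equiv track=rewrite | github.com/AdrianMuntean/project-Euler | smallest_common_mult.py | get_smallest_prime_factors
-- ===== SOURCE A (Python) =====
-- def get_smallest_prime_factors(prime_factors):
--     smallest_prime_factors = {}
--
--     for key in prime_factors:
--         factors = prime_factors[key]
--         for prim_factor in factors:
--             if prim_factor not in smallest_prime_factors:
--                 smallest_prime_factors[prim_factor] = factors[prim_factor]
--             else:
--                 if smallest_prime_factors[prim_factor] < factors[prim_factor]:
--                     smallest_prime_factors[prim_factor] = factors[prim_factor]
--
--     return smallest_prime_factors
-- ===== SOURCE B (Python) =====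
-- def get_smallest_prime_factors(prime_factors):
--     # Phase 1: gather every exponent seen for each prime, in first-seen key order.
--     groups = {}
--     for factors in prime_factors.values():
--         for prime, exp in factors.items():
--             groups.setdefault(prime, []).append(exp)
--     # Phase 2: reduce each group to its maximum.
--     return {prime: max(exps) for prime, exps in groups.items()}
-- ===== Notes on version B (the rewrite author's own statement) =====
-- stated objective: alternative
-- what changed: B splits A's fused loop-with-inline-comparison into two phases: one pass grouping all exponents per prime into lists (setdefault/append), then a comprehension taking max over each group, keeping first-seen key order.
import Mathlib
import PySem

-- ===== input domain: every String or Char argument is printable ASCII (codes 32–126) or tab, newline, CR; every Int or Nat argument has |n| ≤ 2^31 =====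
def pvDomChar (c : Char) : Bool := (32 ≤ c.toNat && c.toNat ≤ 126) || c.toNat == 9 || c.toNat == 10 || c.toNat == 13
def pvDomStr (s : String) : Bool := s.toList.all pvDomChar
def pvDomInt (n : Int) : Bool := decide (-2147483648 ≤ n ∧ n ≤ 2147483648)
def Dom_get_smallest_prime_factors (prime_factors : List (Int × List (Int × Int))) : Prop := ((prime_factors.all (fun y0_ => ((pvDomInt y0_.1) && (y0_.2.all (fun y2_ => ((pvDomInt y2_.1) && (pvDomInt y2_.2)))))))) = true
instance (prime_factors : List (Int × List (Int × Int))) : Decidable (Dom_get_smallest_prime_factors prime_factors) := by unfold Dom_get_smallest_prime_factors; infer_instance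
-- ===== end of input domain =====

-- B is an alternative decomposition of A (gather exponent groups per prime, then reduce each
-- group by max) of the same cost; equivalence is proved on all inputs.

-- shared input marshalling: the Python function receives a dict[int, dict[int, int]]; an
-- association list with duplicate keys collapses the way Python dict construction does
-- (last value wins, key keeps its first position).
def pvToDict (prime_factors : List (Int × List (Int × Int))) : PySem.Dict Int (PySem.Dict Int Int) :=
  PySem.Dict.ofList (prime_factors.map (fun p => (p.1, PySem.Dict.ofList p.2)))

-- ===== PORT A =====
def get_smallest_prime_factors (prime_factors : List (Int × List (Int × Int))) : List (Int × Int) :=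
  let d := pvToDict prime_factors
  -- smallest_prime_factors = {}; for key in prime_factors: factors = prime_factors[key]; …
  let smallest := d.items.foldl (fun spf kf =>
    -- for prim_factor in factors: (pe.2 is factors[prim_factor])
    kf.2.items.foldl (fun spf pe =>
      if spf.contains pe.1 = false then spf.insert pe.1 pe.2
      else if spf.getD pe.1 0 < pe.2 then spf.insert pe.1 pe.2
      else spf) spf) PySem.Dict.empty
  smallest.items

-- ===== PORT B =====
def get_smallest_prime_factors_alt (prime_factors : List (Int × List (Int × Int))) : List (Int × Int) :=
  let d := pvToDict prime_factors
  -- groups = {}; for factors in prime_factors.values(): groups.setdefault(prime, []).append(exp)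
  let groups : PySem.Dict Int (List Int) := d.values.foldl (fun g factors =>
    factors.items.foldl (fun g pe => g.modify pe.1 [] (fun es => es ++ [pe.2])) g) PySem.Dict.empty
  -- {prime: max(exps) for prime, exps in groups.items()} — every group is nonempty, so the
  -- .getD 0 default of max? is never used (max(exps) never raises)
  groups.items.map (fun pes => (pes.1, (PySem.List.max? pes.2 id).getD 0))

-- ===== PRECONDITION & SPEC =====
def Spec_get_smallest_prime_factors (prime_factors : List (Int × List (Int × Int))) (out : List (Int × Int)) : Prop := out = get_smallest_prime_factors_alt prime_factors
instance (prime_factors : List (Int × List (Int × Int))) (out : List (Int × Int)) : Decidable (Spec_get_smallest_prime_factors prime_factors out) := by unfold Spec_get_smallest_prime_factors; infer_instance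

-- ===== CLAIM (what is proved, stated in full; the proofs are below) =====
def Claim_equal_get_smallest_prime_factors : Prop := ∀ (prime_factors : List (Int × List (Int × Int))), Dom_get_smallest_prime_factors prime_factors → Spec_get_smallest_prime_factors prime_factors (get_smallest_prime_factors prime_factors)

-- ===== LEMMAS AND PROOFS =====

-- the reduction B applies to one gathered group
def pvVal (q : Int × List Int) : Int × Int := (q.1, (PySem.List.max? q.2 id).getD 0)

-- invariant relating A's running maxima dict to B's groups dict
def pvInv (s : PySem.Dict Int Int) (g : PySem.Dict Int (List Int)) : Prop :=
  g.keys.Nodup ∧ (∀ q ∈ g.items, q.2 ≠ []) ∧ s.items = g.items.map pvVal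

lemma pvKeys_eq {s : PySem.Dict Int Int} {g : PySem.Dict Int (List Int)}
    (h : s.items = g.items.map pvVal) : s.keys = g.keys := by
  simp only [PySem.Dict.keys, h, List.map_map]
  rfl

lemma pvMax_append (es : List Int) (e : Int) (hne : es ≠ []) :
    (PySem.List.max? (es ++ [e]) id).getD 0 =
      (if (PySem.List.max? es id).getD 0 < e then e else (PySem.List.max? es id).getD 0) := by
  have hsome : ∃ m, PySem.List.max? es id = some m := by
    induction es with
    | nil => exact absurd rfl hne
    | cons a t ih =>
      simp only [PySem.List.max?, List.foldl_cons] at *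
      cases t with
      | nil => exact ⟨a, rfl⟩
      | cons b u =>
        -- foldl starting from some _ stays some
        clear ih hne
        generalize a = x
        induction (b :: u) generalizing x with
        | nil => exact ⟨x, rfl⟩
        | cons c w ih =>
          simp only [List.foldl_cons]
          split <;> exact ih _
  obtain ⟨m, hm⟩ := hsome
  simp [PySem.List.max?, List.foldl_append] at hm ⊢
  rw [hm]
  simp only [Option.getD_some]
  split <;> simp

-- one inner step preserves the invariant
lemma pvStep {s : PySem.Dict Int Int} {g : PySem.Dict Int (List Int)} (pe : Int × Int)
    (h : pvInv s g) :
    pvInv (if s.contains pe.1 = false then s.insert pe.1 pe.2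
           else if s.getD pe.1 0 < pe.2 then s.insert pe.1 pe.2
           else s)
          (g.modify pe.1 [] (fun es => es ++ [pe.2])) := by
  obtain ⟨hnd, hne, hit⟩ := h
  have hkeys := pvKeys_eq hit
  have hcont : s.contains pe.1 = g.contains pe.1 := by
    rw [PySem.Dict.contains_eq_decide_mem_keys, PySem.Dict.contains_eq_decide_mem_keys, hkeys]
  by_cases hc : g.contains pe.1 = true
  · -- prime already grouped: A updates in place, B appends to the group
    have hsc : s.contains pe.1 = true := by rw [hcont, hc]
    obtain ⟨es, hmem⟩ : ∃ es, (pe.1, es) ∈ g.items := by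
      have := (PySem.Dict.contains_iff_mem_keys (d := g) (k := pe.1)).mp hc
      simp only [PySem.Dict.keys, List.mem_map] at this
      obtain ⟨q, hq, hq1⟩ := this
      exact ⟨q.2, by rwa [show (pe.1, q.2) = q from Prod.ext hq1.symm rfl]⟩
    have hesne : es ≠ [] := hne _ hmem
    have hgetg : g.getD pe.1 [] = es := PySem.Dict.getD_of_mem_items _ hmem hnd _
    have hsmem : (pe.1, (PySem.List.max? es id).getD 0) ∈ s.items := by
      rw [hit]; exact List.mem_map_of_mem hmem
    have hsnd : s.keys.Nodup := by rw [hkeys]; exact hnd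
    have hgets : s.getD pe.1 0 = (PySem.List.max? es id).getD 0 :=
      PySem.Dict.getD_of_mem_items _ hsmem hsnd _
    have hmod : g.modify pe.1 [] (fun es => es ++ [pe.2]) = g.insert pe.1 (es ++ [pe.2]) := by
      simp [PySem.Dict.modify, hgetg]
    rw [hmod]
    refine ⟨by rw [PySem.Dict.keys_insert_of_contains _ _ hc]; exact hnd, ?_, ?_⟩
    · intro q hq
      rw [PySem.Dict.items_insert_of_contains _ _ hc] at hq
      obtain ⟨r, hr, hrq⟩ := List.mem_map.mp hq
      by_cases h1 : (r.1 == pe.1) = true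
      · simp only [h1, if_true] at hrq; subst hrq; simp
      · simp only [h1] at hrq; subst hrq; exact hne _ hr
    · rw [hsc]
      simp only [Bool.true_eq_false, if_false]
      rw [PySem.Dict.items_insert_of_contains _ _ hc]
      by_cases hlt : s.getD pe.1 0 < pe.2
      · simp only [hlt, if_true]
        rw [PySem.Dict.items_insert_of_contains _ _ hsc, hit, List.map_map, List.map_map]
        refine List.map_congr_left (fun r hr => ?_)
        by_cases h1 : (r.1 == pe.1) = true
        · simp only [Function.comp, h1, if_true, pvVal]
          rw [pvMax_append es pe.2 hesne, ← hgets]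
          simp [hlt]
        · simp [Function.comp, h1, pvVal]
      · simp only [hlt, if_false]
        rw [hit, List.map_map]
        refine (List.map_congr_left (fun r hr => ?_)).symm
        by_cases h1 : (r.1 == pe.1) = true
        · have hr1 : r.1 = pe.1 := by exact_mod_cast of_decide_eq_true h1
          have hres : r.2 = es := by
            have := PySem.Dict.getD_of_mem_items _ hr hnd ([] : List Int)
            rw [hr1] at this; rw [← this, hgetg]
          simp only [Function.comp, h1, if_true, pvVal]
          rw [pvMax_append es pe.2 hesne, ← hgets, if_neg hlt]
          simp [hr1, hres, hgets]
        · simp [Function.comp, h1, pvVal]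
  · -- new prime: both dicts append a fresh entry
    have hc' : g.contains pe.1 = false := by simpa using hc
    have hsc : s.contains pe.1 = false := by rw [hcont, hc']
    have hgetg : g.getD pe.1 [] = [] := PySem.Dict.getD_of_not_contains _ _ hc'
    have hmod : g.modify pe.1 [] (fun es => es ++ [pe.2]) = g.insert pe.1 [pe.2] := by
      simp [PySem.Dict.modify, hgetg]
    rw [hmod, hsc, if_pos rfl]
    refine ⟨?_, ?_, ?_⟩
    · rw [PySem.Dict.keys_insert_of_not_contains _ _ hc']
      refine List.Nodup.append hnd (List.nodup_singleton _) ?_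
      intro a ha hb
      rw [List.mem_singleton] at hb
      subst hb
      exact absurd ((PySem.Dict.contains_iff_mem_keys g pe.1).mpr ha) (by simp [hc'])
    · intro q hq
      rw [PySem.Dict.items_insert_of_not_contains _ _ hc'] at hq
      rcases List.mem_append.mp hq with h1 | h1
      · exact hne _ h1
      · simp only [List.mem_singleton] at h1; subst h1; simp
    · rw [PySem.Dict.items_insert_of_not_contains _ _ hsc,
          PySem.Dict.items_insert_of_not_contains _ _ hc', hit, List.map_append]
      simp [pvVal, PySem.List.max?]

-- the inner loop (one factors dict) preserves the invariant
lemma pvInner (L : List (Int × Int)) :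
    ∀ (s : PySem.Dict Int Int) (g : PySem.Dict Int (List Int)), pvInv s g →
    pvInv (L.foldl (fun spf pe =>
            if spf.contains pe.1 = false then spf.insert pe.1 pe.2
            else if spf.getD pe.1 0 < pe.2 then spf.insert pe.1 pe.2
            else spf) s)
          (L.foldl (fun g pe => g.modify pe.1 [] (fun es => es ++ [pe.2])) g) := by
  induction L with
  | nil => intro s g h; exact h
  | cons pe t ih => intro s g h; exact ih _ _ (pvStep pe h)

-- the outer loop: A walks d.items, B walks the corresponding values
lemma pvOuter (M : List (Int × PySem.Dict Int Int)) :
    ∀ (s : PySem.Dict Int Int) (g : PySem.Dict Int (List Int)), pvInv s g →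
    pvInv (M.foldl (fun spf kf =>
            kf.2.items.foldl (fun spf pe =>
              if spf.contains pe.1 = false then spf.insert pe.1 pe.2
              else if spf.getD pe.1 0 < pe.2 then spf.insert pe.1 pe.2
              else spf) spf) s)
          ((M.map (·.2)).foldl (fun g factors =>
            factors.items.foldl (fun g pe => g.modify pe.1 [] (fun es => es ++ [pe.2])) g) g) := by
  induction M with
  | nil => intro s g h; exact h
  | cons kf t ih => intro s g h; exact ih _ _ (pvInner kf.2.items s g h)

-- ===== VERDICT (by name: the statement is the Claim_ definition above) =====
theorem get_smallest_prime_factors_spec : Claim_equal_get_smallest_prime_factors := by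
  intro pf _
  unfold Spec_get_smallest_prime_factors get_smallest_prime_factors get_smallest_prime_factors_alt
  simp only []
  have hv : (pvToDict pf).values = (pvToDict pf).items.map (·.2) := rfl
  rw [hv]
  have h := pvOuter (pvToDict pf).items PySem.Dict.empty PySem.Dict.empty
    ⟨by simp [PySem.Dict.keys_empty], by intro q hq; simp [show (PySem.Dict.empty : PySem.Dict Int (List Int)).items = [] from rfl] at hq, by simp [show (PySem.Dict.empty : PySem.Dict Int (List Int)).items = [] from rfl, show (PySem.Dict.empty : PySem.Dict Int Int).items = [] from rfl]⟩
  exact h.2.2
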